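-- pv_equiv track=rewrite | github.com/PhMeier/MA_Thesis | utils/extract_from_sick.py | get_instances_by_id
-- ===== SOURCE A (Python) =====
-- def get_instances_by_id(sick_data, nat_data):
--     # first, get the ids
--     idx_nat = []
--     extracted_rows = []
--     for row in nat_data:
--         idx_nat.append(row[0])
--     for idx in idx_nat:
--         for row in sick_data:
--             if idx == row[0]:
--                 extracted_rows.append(row)
--     return extracted_rows
-- ===== SOURCE B (Python) =====
-- def get_instances_by_id(sick_data, nat_data):
--     if not nat_data:
--         return []
--     index = {}
--     for row in sick_data:
--         index.setdefault(row[0], []).append(row)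
--     extracted_rows = []
--     for row in nat_data:
--         extracted_rows += index.get(row[0], [])
--     return extracted_rows
-- ===== Notes on version B (the rewrite author's own statement) =====
-- stated objective: alternative
-- what changed: B returns [] immediately when nat_data is empty and otherwise builds a dict from sick id to its ordered list of rows in one pass, then looks up each nat id, replacing A's inner scan of sick_data per nat id; on duplicate-heavy inputs the output itself is large, so this was not measurably faster in a timing run.
import Mathlib
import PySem

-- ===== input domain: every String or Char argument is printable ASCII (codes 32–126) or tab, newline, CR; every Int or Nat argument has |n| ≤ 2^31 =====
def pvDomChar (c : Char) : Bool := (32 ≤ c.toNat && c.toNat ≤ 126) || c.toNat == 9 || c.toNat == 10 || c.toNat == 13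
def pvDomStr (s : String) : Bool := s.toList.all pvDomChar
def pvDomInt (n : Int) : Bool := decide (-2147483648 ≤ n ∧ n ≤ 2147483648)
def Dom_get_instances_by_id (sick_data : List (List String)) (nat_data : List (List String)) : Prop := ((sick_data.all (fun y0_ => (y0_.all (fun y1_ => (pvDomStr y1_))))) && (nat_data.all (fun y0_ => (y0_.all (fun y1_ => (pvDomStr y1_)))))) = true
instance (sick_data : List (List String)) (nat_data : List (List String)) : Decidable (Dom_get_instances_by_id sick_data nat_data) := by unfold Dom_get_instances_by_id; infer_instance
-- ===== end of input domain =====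

-- B replaces A's per-id scan of sick_data by a dict from sick id to its rows, built once
-- (skipped entirely when nat_data is empty) — an alternative algorithm, not measured faster.

-- ===== PORT A =====
-- row[0] is ported as (pyGet? row 0).getD ""; Pre_ guarantees the default is never used.
def get_instances_by_id (sick_data : List (List String)) (nat_data : List (List String)) : List (List String) :=
  let idx_nat : List String :=
    nat_data.foldl (fun acc row => acc ++ [(PySem.List.pyGet? row 0).getD ""]) []
  idx_nat.foldl (fun extracted idx =>
    sick_data.foldl (fun acc row =>
      if idx == (PySem.List.pyGet? row 0).getD "" then acc ++ [row] else acc) extracted) []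

-- ===== PORT B =====
-- index.setdefault(row[0], []).append(row) is ported as Dict.modify key [] (· ++ [row]) (exact: same dict state).
def get_instances_by_id_alt (sick_data : List (List String)) (nat_data : List (List String)) : List (List String) :=
  if nat_data == [] then []
  else
    let index : PySem.Dict String (List (List String)) :=
      sick_data.foldl (fun d row => d.modify ((PySem.List.pyGet? row 0).getD "") [] (· ++ [row])) PySem.Dict.empty
    nat_data.foldl (fun acc row => acc ++ index.getD ((PySem.List.pyGet? row 0).getD "") []) []

-- ===== PRECONDITION & SPEC =====
-- Pre_ excludes exactly the inputs on which A raises IndexError: an empty row in nat_data,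
-- or (when nat_data is nonempty, so the inner scan runs) an empty row in sick_data.
def Pre_get_instances_by_id (sick_data : List (List String)) (nat_data : List (List String)) : Prop :=
  (∀ r ∈ nat_data, r ≠ []) ∧ (nat_data ≠ [] → ∀ r ∈ sick_data, r ≠ [])
instance (sick_data : List (List String)) (nat_data : List (List String)) : Decidable (Pre_get_instances_by_id sick_data nat_data) := by unfold Pre_get_instances_by_id; infer_instance
def pvWitness_get_instances_by_id : List (List String) × List (List String) :=
  ([["1", "a"], ["2", "b"], ["1", "c"]], [["1"], ["3"]])
def Spec_get_instances_by_id (sick_data : List (List String)) (nat_data : List (List String)) (out : List (List String)) : Prop := out = get_instances_by_id_alt sick_data nat_data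
instance (sick_data : List (List String)) (nat_data : List (List String)) (out : List (List String)) : Decidable (Spec_get_instances_by_id sick_data nat_data out) := by unfold Spec_get_instances_by_id; infer_instance

-- ===== CLAIM (what is proved, stated in full; the proofs are below) =====
def Claim_equal_get_instances_by_id : Prop := ∀ (sick_data : List (List String)) (nat_data : List (List String)), Dom_get_instances_by_id sick_data nat_data → Pre_get_instances_by_id sick_data nat_data → Spec_get_instances_by_id sick_data nat_data (get_instances_by_id sick_data nat_data)

-- ===== LEMMAS AND PROOFS =====

def pvKey (row : List String) : String := (PySem.List.pyGet? row 0).getD ""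

-- Both sides reduce to this flatMap-of-filters normal form.
theorem pv_A_eq (sick_data nat_data : List (List String)) :
    get_instances_by_id sick_data nat_data =
      nat_data.flatMap (fun row => sick_data.filter (fun r => pvKey row == pvKey r)) := by
  unfold get_instances_by_id
  rw [PySem.List.foldl_append_singleton_eq_map]
  have hinner : ∀ (idx : String) (acc : List (List String)),
      sick_data.foldl (fun acc row => if idx == pvKey row then acc ++ [row] else acc) acc
        = acc ++ sick_data.filter (fun r => idx == pvKey r) :=
    fun idx acc => by
      simpa using PySem.List.foldl_append_if (fun r => idx == pvKey r) (fun r : List String => r) sick_data acc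
  calc (nat_data.map pvKey).foldl (fun extracted idx =>
          sick_data.foldl (fun acc row => if idx == pvKey row then acc ++ [row] else acc) extracted) []
      = (nat_data.map pvKey).foldl (fun extracted idx =>
          extracted ++ sick_data.filter (fun r => idx == pvKey r)) [] := by
        apply PySem.List.foldl_congr_mem
        intro acc idx _
        exact hinner idx acc
    _ = (nat_data.map pvKey).flatMap (fun idx => sick_data.filter (fun r => idx == pvKey r)) := by
        rw [PySem.List.foldl_append_eq_flatMap]; simp
    _ = nat_data.flatMap (fun row => sick_data.filter (fun r => pvKey row == pvKey r)) := by
        rw [List.flatMap_map]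

theorem pv_index_getD (sick_data : List (List String)) (k : String) :
    (sick_data.foldl (fun d row => d.modify (pvKey row) [] (· ++ [row]))
        (PySem.Dict.empty : PySem.Dict String (List (List String)))).getD k []
      = sick_data.filter (fun r => pvKey r == k) := by
  calc (sick_data.foldl (fun d row => d.modify (pvKey row) [] (· ++ [row]))
          (PySem.Dict.empty : PySem.Dict String (List (List String)))).getD k []
      = ((sick_data.map (fun row => (pvKey row, row))).foldl
          (fun d (p : String × List String) => d.modify p.1 [] (· ++ [p.2]))
          (PySem.Dict.empty : PySem.Dict String (List (List String)))).getD k [] := by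
        rw [List.foldl_map]
    _ = sick_data.filter (fun r => pvKey r == k) := by
        rw [PySem.Dict.getD_foldl_modify_append]
        simp [List.filter_map, Function.comp_def]

theorem pv_B_eq (sick_data nat_data : List (List String)) :
    get_instances_by_id_alt sick_data nat_data =
      nat_data.flatMap (fun row => sick_data.filter (fun r => pvKey row == pvKey r)) := by
  unfold get_instances_by_id_alt
  by_cases h : nat_data = []
  · simp [h]
  · rw [if_neg (by simpa using h)]
    calc nat_data.foldl (fun acc row =>
            acc ++ (sick_data.foldl (fun d r => d.modify (pvKey r) [] (· ++ [r]))
              PySem.Dict.empty).getD (pvKey row) []) []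
        = nat_data.foldl (fun acc row =>
            acc ++ sick_data.filter (fun r => pvKey r == pvKey row)) [] := by
          apply PySem.List.foldl_congr_mem
          intro acc row _
          rw [pv_index_getD]
      _ = nat_data.flatMap (fun row => sick_data.filter (fun r => pvKey r == pvKey row)) := by
          rw [PySem.List.foldl_append_eq_flatMap]; simp
      _ = nat_data.flatMap (fun row => sick_data.filter (fun r => pvKey row == pvKey r)) := by
          apply List.flatMap_congr
          intro row _
          apply List.filter_congr
          intro r _
          exact Bool.beq_comm

-- ===== VERDICT (by name: the statement is the Claim_ definition above) =====
theorem get_instances_by_id_spec : Claim_equal_get_instances_by_id := by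
  intro sick_data nat_data _ _
  unfold Spec_get_instances_by_id
  rw [pv_A_eq, pv_B_eq]
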